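-- pv_equiv track=rewrite | github.com/StepanPrivalov/Python | Basements/PythonSorts/Python/Python.py | rightBoundary
-- ===== SOURCE A (Python) =====
-- def rightBoundary(A, key):
-- 	left = -1
-- 	right = len(A)
-- 	while right - left > 1:
-- 		mid = (left + right) // 2
-- 		if A[mid] <= key:
-- 			left = mid
-- 		else:
-- 			right = mid
-- 	return right
-- ===== SOURCE B (Python) =====
-- def rightBoundary(A, key):
--     def go(off, seg):
--         if not seg:
--             return off
--         i = (len(seg) - 1) // 2
--         if seg[i] <= key:
--             return go(off + i + 1, seg[i + 1:])
--         return go(off, seg[:i])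
--     return go(0, A)
-- ===== Notes on version B (the rewrite author's own statement) =====
-- stated objective: alternative
-- what changed: Replaced the index-pair while-loop (left/right with a -1 sentinel) by a recursion over list slices: a helper go(off, seg) that splits the current segment at its middle element and recurses on the right or left slice, accumulating an offset; it performs the same comparisons as A, so it matches A even on unsorted input.
import Mathlib
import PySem

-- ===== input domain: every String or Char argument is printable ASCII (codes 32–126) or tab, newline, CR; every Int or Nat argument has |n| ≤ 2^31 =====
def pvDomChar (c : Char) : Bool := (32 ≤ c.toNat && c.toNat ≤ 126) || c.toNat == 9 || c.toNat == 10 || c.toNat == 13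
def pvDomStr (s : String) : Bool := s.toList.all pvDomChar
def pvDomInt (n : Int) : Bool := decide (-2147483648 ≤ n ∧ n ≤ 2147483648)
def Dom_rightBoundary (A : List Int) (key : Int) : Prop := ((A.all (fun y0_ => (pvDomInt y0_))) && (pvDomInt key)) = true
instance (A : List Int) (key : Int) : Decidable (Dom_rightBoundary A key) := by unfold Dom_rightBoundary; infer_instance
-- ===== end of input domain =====

-- B replaces A's index-pair while-loop (left/right with a -1 sentinel) by a recursion over
-- list slices: go(off, seg) splits the current segment at its middle element and recurses on
-- the right or left slice, accumulating an offset (objective: alternative decomposition).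
-- It performs the same comparison sequence as A, so it agrees with A even on unsorted input.

-- ===== PORT A =====
-- the while-loop of A, as tail recursion with fuel length A + 2 (> initial gap right - left,
-- which shrinks by at least 1 per iteration, so fuel never runs out on reachable states)
def rbWhile (A : List Int) (key : Int) (fuel : Nat) (left right : Int) : Int :=
  match fuel with
  | 0 => right
  | fuel + 1 =>
    if right - left > 1 then
      if PySem.List.pyGetD A (PySem.Int.floordiv (left + right) 2) 0 ≤ key then
        rbWhile A key fuel (PySem.Int.floordiv (left + right) 2) right
      else
        rbWhile A key fuel left (PySem.Int.floordiv (left + right) 2)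
    else right

def rightBoundary (A : List Int) (key : Int) : Int :=
  rbWhile A key (A.length + 2) (-1) (A.length : Int)

-- ===== PORT B =====
-- B's helper go(off, seg); the recursion consumes at least one element of seg per step, so
-- it is made total by a structural fuel of length seg + 1 (a totality device only).
-- seg[i] with 0 <= i < len(seg) is read as seg.getD i 0 (always in range here).
def rbGo (key : Int) (off : Int) (fuel : Nat) (seg : List Int) : Int :=
  match fuel with
  | 0 => off
  | fuel + 1 =>
    if seg = [] then off
    else
      let i := (seg.length - 1) / 2
      if seg.getD i 0 ≤ key then
        rbGo key (off + (i : Int) + 1) fuel (seg.drop (i + 1))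
      else
        rbGo key off fuel (seg.take i)

def rightBoundary_alt (A : List Int) (key : Int) : Int :=
  rbGo key 0 (A.length + 1) A

-- ===== PRECONDITION & SPEC =====
def Spec_rightBoundary (A : List Int) (key : Int) (out : Int) : Prop := out = rightBoundary_alt A key
instance (A : List Int) (key : Int) (out : Int) : Decidable (Spec_rightBoundary A key out) := by unfold Spec_rightBoundary; infer_instance

-- ===== CLAIM =====
def Claim_equal_rightBoundary : Prop := ∀ (A : List Int) (key : Int), Dom_rightBoundary A key → Spec_rightBoundary A key (rightBoundary A key)

-- ===== LEMMAS AND PROOFS =====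
-- Invariant: with left = lp - 1 and right = lp + m (lp + m ≤ length A, enough fuel on both
-- sides), A's loop computes exactly B's recursion on the segment (A.drop lp).take m with
-- offset lp: both test the same element A[lp + (m-1)/2] and shrink the same way.
theorem rbWhile_eq_rbGo (A : List Int) (key : Int) :
    ∀ fa fb lp m : Nat, lp + m ≤ A.length → m ≤ fa → m ≤ fb →
      rbWhile A key fa ((lp : Int) - 1) ((lp : Int) + m) =
        rbGo key lp fb ((A.drop lp).take m) := by
  intro fa
  induction fa with
  | zero =>
    intro fb lp m hlen hfa hfb
    interval_cases m
    cases fb <;> simp [rbWhile, rbGo]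
  | succ f ih =>
    intro fb lp m hlen hfa hfb
    rcases Nat.eq_zero_or_pos m with hm | hm
    · subst hm
      cases fb <;> simp [rbWhile, rbGo]
    · -- m ≥ 1 : the loop body runs; seg is nonempty and fb = g + 1
      obtain ⟨g, rfl⟩ : ∃ g, fb = g + 1 := ⟨fb - 1, by omega⟩
      have hseg_len : ((A.drop lp).take m).length = m := by
        simp [List.length_take, List.length_drop]; omega
      have hseg_ne : (A.drop lp).take m ≠ [] := by
        intro h; rw [h] at hseg_len; simp at hseg_len; omega
      set i : Nat := (m - 1) / 2 with hi
      have hi_lt : i < m := by omega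
      -- the midpoint: (left + right) // 2 = lp + i
      have hmid : PySem.Int.floordiv (((lp : Int) - 1) + ((lp : Int) + m)) 2 = (lp : Int) + i := by
        rw [PySem.Int.floordiv_eq_ediv_of_pos (by omega)]
        omega
      -- the compared element is the same on both sides
      have helem : PySem.List.pyGetD A ((lp : Int) + i) 0 = ((A.drop lp).take m).getD i 0 := by
        have hcast : ((lp : Int) + i) = ((lp + i : Nat) : Int) := by push_cast; ring
        rw [hcast, PySem.List.pyGetD_natCast]
        have hlt : lp + i < A.length := by omega
        have hlt2 : i < ((A.drop lp).take m).length := by rw [hseg_len]; exact hi_lt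
        rw [List.getD_eq_getElem _ _ hlt, List.getD_eq_getElem _ _ hlt2,
            List.getElem_take, List.getElem_drop]
      rw [rbWhile]
      have hgt : ((lp : Int) + m) - ((lp : Int) - 1) > 1 := by omega
      rw [if_pos hgt, hmid, helem]
      rw [rbGo, if_neg hseg_ne]
      simp only [hseg_len]
      rw [show (m - 1) / 2 = i from rfl]
      by_cases hle : ((A.drop lp).take m).getD i 0 ≤ key
      · rw [if_pos hle, if_pos hle]
        have h1 : (lp : Int) + i = ((lp + i + 1 : Nat) : Int) - 1 := by omega
        have h2 : (lp : Int) + m = ((lp + i + 1 : Nat) : Int) + ((m - i - 1 : Nat) : Nat) := by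
          omega
        rw [h1, h2, ih g (lp + i + 1) (m - i - 1) (by omega) (by omega) (by omega)]
        congr 2
        · push_cast; ring
        · rw [List.drop_take, List.drop_drop]
          congr 1
      · rw [if_neg hle, if_neg hle]
        have h3 := ih g lp i (by omega) (by omega) (by omega)
        rw [h3]
        congr 1
        rw [List.take_take]
        congr 1
        omega

-- ===== VERDICT =====
theorem rightBoundary_spec : Claim_equal_rightBoundary := by
  intro A key _
  unfold Spec_rightBoundary rightBoundary rightBoundary_alt
  have h := rbWhile_eq_rbGo A key (A.length + 2) (A.length + 1) 0 A.length (by omega)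
    (by omega) (by omega)
  simpa using h
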